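-- pv_equiv track=rewrite | github.com/YonatanGideoni/YonatanGideoni.github.io | blog/bib2html.py | split_authors_raw
-- ===== SOURCE A (Python) =====
-- def split_authors_raw(s: str):
--     out = []
--     if not s:
--         return out
--     cur = []
--     depth = 0
--     i = 0
--     while i < len(s):
--         ch = s[i]
--         if ch == '{':
--             depth += 1
--             cur.append(ch)
--             i += 1
--             continue
--         if ch == '}':
--             depth = max(0, depth - 1)
--             cur.append(ch)
--             i += 1
--             continue
--         # detect " and " at depth 0
--         if depth == 0 and s[i:i + 5].lower() == ' and ':
--             token = ''.join(cur).strip()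
--             if token:
--                 out.append(token)
--             cur = []
--             i += 5
--             continue
--         cur.append(ch)
--         i += 1
--     token = ''.join(cur).strip()
--     if token:
--         out.append(token)
--     return out
-- ===== SOURCE B (Python) =====
-- def split_authors_raw(s: str):
--     # Three-pass position-based rewrite: precompute a brace-depth table, locate
--     # top-level ' and ' separators with str.find on a lowercased copy, then slice.
--     if not s:
--         return []
--     depth_before = []
--     d = 0
--     for ch in s:
--         depth_before.append(d)
--         if ch == '{':
--             d += 1
--         elif ch == '}':
--             d = max(0, d - 1)
--     low = s.lower()
--     cuts = []
--     pos = low.find(' and ')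
--     while pos != -1:
--         if depth_before[pos] == 0:
--             cuts.append(pos)
--             pos = low.find(' and ', pos + 5)
--         else:
--             pos = low.find(' and ', pos + 1)
--     out = []
--     start = 0
--     for c in cuts:
--         tok = s[start:c].strip()
--         if tok:
--             out.append(tok)
--         start = c + 5
--     tok = s[start:].strip()
--     if tok:
--         out.append(tok)
--     return out
-- ===== Notes on version B (the rewrite author's own statement) =====
-- stated objective: faster
-- what changed: A fuses everything into one per-character Python loop with a running buffer and depth counter; B precomputes a brace-depth table, locates top-level separator occurrences with str.find on a lowercased copy, and slices the original string at the recorded cut positions, so the scanning work runs in C.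
import Mathlib
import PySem

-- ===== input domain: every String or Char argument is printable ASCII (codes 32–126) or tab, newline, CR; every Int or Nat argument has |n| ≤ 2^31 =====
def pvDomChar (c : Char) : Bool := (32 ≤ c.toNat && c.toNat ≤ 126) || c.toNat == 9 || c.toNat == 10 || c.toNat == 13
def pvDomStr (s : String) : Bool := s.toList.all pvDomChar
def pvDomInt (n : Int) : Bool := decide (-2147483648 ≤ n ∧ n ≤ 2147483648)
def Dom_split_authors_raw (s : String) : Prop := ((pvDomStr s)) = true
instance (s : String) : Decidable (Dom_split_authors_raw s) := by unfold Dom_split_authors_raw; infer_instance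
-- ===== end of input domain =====

-- B splits by position instead of by a running buffer: a precomputed brace-depth
-- table, repeated str.find of the separator on a lowercased copy, then slicing
-- (a timing run measured B faster by a constant factor: find runs in C).

-- ===== PORT A =====
-- A's while-loop: index i, running depth, current-token buffer cur, output out.
-- (Python clamps with max(0, depth-1); on Nat, 'depth - 1' is exactly that clamp.)
def pvAloop (cs : List Char) (i depth : Nat) (cur : List Char) (out : List String) : List String :=
  if h : i < cs.length then
    let ch := cs[i]
    if ch = '{' then pvAloop cs (i+1) (depth+1) (cur ++ [ch]) out
    else if ch = '}' then pvAloop cs (i+1) (depth - 1) (cur ++ [ch]) out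
    else if depth = 0 ∧ PySem.Chars.lower (PySem.List.slice cs (some (i : Int)) (some ((i+5 : Nat) : Int))) = [' ', 'a', 'n', 'd', ' '] then
      let token := PySem.Chars.strip cur
      pvAloop cs (i+5) depth [] (if token = [] then out else out ++ [String.ofList token])
    else pvAloop cs (i+1) depth (cur ++ [ch]) out
  else
    let token := PySem.Chars.strip cur
    if token = [] then out else out ++ [String.ofList token]
  termination_by cs.length - i
  decreasing_by all_goals omega

def split_authors_raw (s : String) : List String :=
  if s.toList = [] then [] else pvAloop s.toList 0 0 [] []

-- ===== PORT B =====
-- B pass 1: the brace depth in effect before each index.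
def pvDepths (cs : List Char) : List Nat :=
  (cs.foldl (fun (st : List Nat × Nat) ch =>
      (st.1 ++ [st.2], if ch = '{' then st.2 + 1 else if ch = '}' then st.2 - 1 else st.2))
    ([], 0)).1

-- B pass 2: repeated low.find(' and ', pos); fuel only makes the while-loop total
-- (pos strictly increases and stays ≤ len, so length+1 iterations always suffice).
def pvCutsLoop (low : List Char) (depths : List Nat) : Nat → Nat → List Nat
  | 0, _ => []
  | fuel+1, pos =>
    let p := PySem.Chars.findFrom low [' ', 'a', 'n', 'd', ' '] (pos : Int) none
    if p = -1 then []
    else if depths.getD p.toNat 0 = 0 then  -- depth_before[p]; p is a valid index here, so getD is exact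
      p.toNat :: pvCutsLoop low depths fuel (p.toNat + 5)
    else pvCutsLoop low depths fuel (p.toNat + 1)

-- B pass 3: slice the original string between consecutive cut boundaries.
def split_authors_raw_alt (s : String) : List String :=
  let cs := s.toList
  if cs = [] then [] else
    let cuts := pvCutsLoop (PySem.Chars.lower cs) (pvDepths cs) (cs.length + 1) 0
    let st := cuts.foldl (fun (st : List String × Nat) (c : Nat) =>
        let tok := PySem.Chars.strip (PySem.List.slice cs (some (st.2 : Int)) (some (c : Int)))
        ((if tok = [] then st.1 else st.1 ++ [String.ofList tok]), (c + 5 : Nat))) ([], 0)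
    let tok := PySem.Chars.strip (PySem.List.slice cs (some (st.2 : Int)) none)
    if tok = [] then st.1 else st.1 ++ [String.ofList tok]

-- ===== PRECONDITION & SPEC =====
def Spec_split_authors_raw (s : String) (out : List String) : Prop := out = split_authors_raw_alt s
instance (s : String) (out : List String) : Decidable (Spec_split_authors_raw s out) := by unfold Spec_split_authors_raw; infer_instance

-- ===== CLAIM (what is proved, stated in full; the proofs are below) =====
def Claim_equal_split_authors_raw : Prop := ∀ (s : String), Dom_split_authors_raw s → Spec_split_authors_raw s (split_authors_raw s)

-- ===== LEMMAS AND PROOFS =====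

-- Proof-side vocabulary.
def pvPat : List Char := [' ', 'a', 'n', 'd', ' ']

def pvStepD (d : Nat) (c : Char) : Nat := if c = '{' then d + 1 else if c = '}' then d - 1 else d

-- depth in effect before index i
def pvDepthAt (cs : List Char) (i : Nat) : Nat := (cs.take i).foldl pvStepD 0

-- reference scan: accepted cut positions from index i onwards
def pvScan (cs : List Char) (i : Nat) : List Nat :=
  if h : i < cs.length then
    if PySem.Chars.lower ((cs.drop i).take 5) = pvPat ∧ pvDepthAt cs i = 0 then
      i :: pvScan cs (i+5)
    else pvScan cs (i+1)
  else []
  termination_by cs.length - i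
  decreasing_by all_goals omega

def pvStripNE (t : List Char) : List String :=
  if PySem.Chars.strip t = [] then [] else [String.ofList (PySem.Chars.strip t)]

-- tokens produced from segment start `start` and the remaining cut positions
def pvEmitFrom (cs : List Char) : Nat → List Nat → List String
  | start, [] => pvStripNE (cs.drop start)
  | start, c :: rest => pvStripNE ((cs.drop start).take (c - start)) ++ pvEmitFrom cs (c+5) rest

theorem pvLower_map (cs : List Char) : PySem.Chars.lower cs = cs.map PySem.Chars.lowerChar := by
  simp [PySem.Chars.lower]

theorem pvDepthsAux (cs : List Char) (a : List Nat) (d : Nat) :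
    cs.foldl (fun (st : List Nat × Nat) ch =>
      (st.1 ++ [st.2], if ch = '{' then st.2 + 1 else if ch = '}' then st.2 - 1 else st.2)) (a, d)
    = (a ++ (List.range cs.length).map (fun i => (cs.take i).foldl pvStepD d), cs.foldl pvStepD d) := by
  induction cs generalizing a d with
  | nil => simp
  | cons c cs ih =>
    simp only [List.foldl_cons]
    rw [show (if c = '{' then d + 1 else if c = '}' then d - 1 else d) = pvStepD d c from rfl, ih]
    simp [List.range_succ_eq_map, List.map_map, Function.comp, pvStepD]

theorem pvDepths_eq (cs : List Char) :
    pvDepths cs = (List.range cs.length).map (pvDepthAt cs) := by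
  unfold pvDepths
  rw [pvDepthsAux]
  rfl

theorem pvDepths_getD (cs : List Char) (i : Nat) (hi : i < cs.length) :
    (pvDepths cs).getD i 0 = pvDepthAt cs i := by
  rw [pvDepths_eq]
  simp [List.getD, hi]

theorem pvMatch_head (cs : List Char) (i : Nat) (hi : i < cs.length)
    (h : PySem.Chars.lower ((cs.drop i).take 5) = pvPat) :
    PySem.Chars.lowerChar cs[i] = ' ' := by
  have h0 := congrArg (fun l => l[0]?) h
  rw [pvLower_map] at h0
  simp [pvPat, hi] at h0
  exact h0

theorem pvStepD_id (seg : List Char) (hseg : ∀ c ∈ seg, c ≠ '{' ∧ c ≠ '}') (d : Nat) :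
    seg.foldl pvStepD d = d := by
  induction seg generalizing d with
  | nil => rfl
  | cons c t ih =>
    have hc := hseg c (List.mem_cons_self ..)
    simp only [List.foldl_cons, pvStepD, if_neg hc.1, if_neg hc.2]
    exact ih (fun x hx => hseg x (List.mem_cons_of_mem _ hx)) d

theorem pvMatch_depth (cs : List Char) (i : Nat)
    (h : PySem.Chars.lower ((cs.drop i).take 5) = pvPat) :
    pvDepthAt cs (i+5) = pvDepthAt cs i := by
  unfold pvDepthAt
  rw [List.take_add, List.foldl_append]
  refine pvStepD_id _ (fun c hc => ?_) _
  have hm : PySem.Chars.lowerChar c ∈ pvPat := by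
    rw [← h, pvLower_map]
    exact List.mem_map_of_mem hc
  constructor <;> rintro rfl <;> revert hm <;> decide

theorem pvMatch_iff_prefix (cs : List Char) (i : Nat) :
    PySem.Chars.lower ((cs.drop i).take 5) = pvPat ↔ pvPat <+: (PySem.Chars.lower cs).drop i := by
  rw [List.prefix_iff_eq_take, pvLower_map, pvLower_map, ← List.map_drop, ← List.map_take]
  show _ = _ ↔ pvPat = _
  exact eq_comm

theorem pvDepthAt_succ (cs : List Char) (i : Nat) (hi : i < cs.length) :
    pvDepthAt cs (i+1) = pvStepD (pvDepthAt cs i) cs[i] := by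
  unfold pvDepthAt
  rw [List.take_add_one, List.getElem?_eq_getElem hi]
  simp only [Option.toList_some, List.foldl_append, List.foldl_cons, List.foldl_nil]

theorem pvScan_stop (cs : List Char) (pos : Nat)
    (h : ∀ j, pos ≤ j → ¬ PySem.Chars.lower ((cs.drop j).take 5) = pvPat) :
    pvScan cs pos = [] := by
  rw [pvScan]
  split
  · rename_i hlt
    rw [if_neg (fun hc => h pos le_rfl hc.1)]
    exact pvScan_stop cs (pos+1) (fun j hj => h j (by omega))
  · rfl
termination_by cs.length - pos
decreasing_by omega

theorem pvScan_skip (cs : List Char) (pos q : Nat) (hpq : pos ≤ q)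
    (h : ∀ j, pos ≤ j → j < q → ¬ PySem.Chars.lower ((cs.drop j).take 5) = pvPat) :
    pvScan cs pos = pvScan cs q := by
  rcases Nat.eq_or_lt_of_le hpq with rfl | hlt
  · rfl
  · by_cases hp : pos < cs.length
    · rw [pvScan]
      rw [dif_pos hp, if_neg (fun hc => h pos le_rfl hlt hc.1)]
      exact pvScan_skip cs (pos+1) q hlt (fun j h1 h2 => h j (by omega) h2)
    · rw [pvScan, dif_neg hp, pvScan, dif_neg (by omega)]
termination_by q - pos
decreasing_by omega

theorem pvCutsLoop_eq_scan (cs : List Char) (fuel pos : Nat)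
    (hpos : pos ≤ cs.length) (hfuel : cs.length + 1 - pos ≤ fuel) :
    pvCutsLoop (PySem.Chars.lower cs) (pvDepths cs) fuel pos = pvScan cs pos := by
  induction fuel generalizing pos with
  | zero => omega
  | succ fuel ih =>
    have hlen : (PySem.Chars.lower cs).length = cs.length := by rw [pvLower_map]; simp
    show (if PySem.Chars.findFrom (PySem.Chars.lower cs) [' ', 'a', 'n', 'd', ' '] (pos : Int) none = -1 then []
          else if (pvDepths cs).getD (PySem.Chars.findFrom (PySem.Chars.lower cs) [' ', 'a', 'n', 'd', ' '] (pos : Int) none).toNat 0 = 0 then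
            (PySem.Chars.findFrom (PySem.Chars.lower cs) [' ', 'a', 'n', 'd', ' '] (pos : Int) none).toNat
              :: pvCutsLoop (PySem.Chars.lower cs) (pvDepths cs) fuel
                  ((PySem.Chars.findFrom (PySem.Chars.lower cs) [' ', 'a', 'n', 'd', ' '] (pos : Int) none).toNat + 5)
          else pvCutsLoop (PySem.Chars.lower cs) (pvDepths cs) fuel
                  ((PySem.Chars.findFrom (PySem.Chars.lower cs) [' ', 'a', 'n', 'd', ' '] (pos : Int) none).toNat + 1))
        = pvScan cs pos
    rw [show ([' ', 'a', 'n', 'd', ' '] : List Char) = pvPat from rfl]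
    by_cases hneg : PySem.Chars.findFrom (PySem.Chars.lower cs) pvPat (pos : Int) none = -1
    · rw [if_pos hneg]
      have hno := (PySem.Chars.findFrom_natCast_eq_neg_one_iff _ pvPat pos (by omega)).mp hneg
      refine (pvScan_stop cs pos (fun j hj hc => hno ?_)).symm
      have hpref : pvPat <+: (PySem.Chars.lower cs).drop j := (pvMatch_iff_prefix cs j).mp hc
      have hdj : (PySem.Chars.lower cs).drop j = ((PySem.Chars.lower cs).drop pos).drop (j - pos) := by
        rw [List.drop_drop]
        congr 1
        omega
      rw [hdj] at hpref
      exact hpref.isInfix.trans (List.drop_suffix _ _).isInfix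
    · rw [if_neg hneg]
      obtain ⟨hq1, hq2, hq3⟩ := PySem.Chars.findFrom_natCast_spec (PySem.Chars.lower cs) pvPat pos (by omega) hneg
      have hposq : pos ≤ (PySem.Chars.findFrom (PySem.Chars.lower cs) pvPat (pos : Int) none).toNat := by omega
      have hq5 : (PySem.Chars.findFrom (PySem.Chars.lower cs) pvPat (pos : Int) none).toNat + 5 ≤ cs.length := by
        have := hq2.length_le
        rw [List.length_drop, hlen] at this
        have h5 : pvPat.length = 5 := rfl
        omega
      have hmq := (pvMatch_iff_prefix cs _).mpr hq2
      have hskip := pvScan_skip cs pos _ hposq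
        (fun j h1 h2 hc => hq3 j h1 h2 ((pvMatch_iff_prefix cs j).mp hc))
      rw [hskip, pvDepths_getD cs _ (by omega)]
      by_cases hd0 : pvDepthAt cs (PySem.Chars.findFrom (PySem.Chars.lower cs) pvPat (pos : Int) none).toNat = 0
      · rw [if_pos hd0, pvScan, dif_pos (by omega : (PySem.Chars.findFrom (PySem.Chars.lower cs) pvPat (pos : Int) none).toNat < cs.length),
            if_pos ⟨hmq, hd0⟩, ih _ (by omega) (by omega)]
      · rw [if_neg hd0, pvScan, dif_pos (by omega : (PySem.Chars.findFrom (PySem.Chars.lower cs) pvPat (pos : Int) none).toNat < cs.length),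
            if_neg (fun hc => hd0 hc.2), ih _ (by omega) (by omega)]

theorem pvOutApp (t : List Char) (out : List String) :
    (if PySem.Chars.strip t = [] then out else out ++ [String.ofList (PySem.Chars.strip t)])
      = out ++ pvStripNE t := by
  unfold pvStripNE
  split <;> simp

theorem pvAloop_eq (cs : List Char) (i start : Nat) (out : List String) (hsi : start ≤ i) :
    pvAloop cs i (pvDepthAt cs i) ((cs.drop start).take (i - start)) out
      = out ++ pvEmitFrom cs start (pvScan cs i) := by
  by_cases hlt : i < cs.length
  · have hcur : (cs.drop start).take (i - start) ++ [cs[i]] = (cs.drop start).take (i + 1 - start) := by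
      have h1 : i + 1 - start = (i - start) + 1 := by omega
      have h2 : (cs.drop start)[i - start]? = some cs[i] := by
        rw [List.getElem?_drop, show start + (i - start) = i from by omega, List.getElem?_eq_getElem hlt]
      rw [h1, List.take_add_one, h2]
      rfl
    rw [pvAloop, dif_pos hlt, pvScan, dif_pos hlt,
        PySem.List.slice_natCast, show i + 5 - i = 5 from by omega,
        show ([' ', 'a', 'n', 'd', ' '] : List Char) = pvPat from rfl]
    dsimp only
    by_cases hb1 : cs[i] = '{'
    · have hnm : ¬ PySem.Chars.lower ((cs.drop i).take 5) = pvPat := fun hm => by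
        have := pvMatch_head cs i hlt hm
        rw [hb1] at this
        exact absurd this (by decide)
      rw [if_pos hb1, if_neg (fun hc => hnm hc.1), hcur,
          show pvDepthAt cs i + 1 = pvDepthAt cs (i+1) from by
            rw [pvDepthAt_succ cs i hlt, hb1]; rfl]
      exact pvAloop_eq cs (i+1) start out (by omega)
    · by_cases hb2 : cs[i] = '}'
      · have hnm : ¬ PySem.Chars.lower ((cs.drop i).take 5) = pvPat := fun hm => by
          have := pvMatch_head cs i hlt hm
          rw [hb2] at this
          exact absurd this (by decide)
        rw [if_neg hb1, if_pos hb2, if_neg (fun hc => hnm hc.1), hcur,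
            show pvDepthAt cs i - 1 = pvDepthAt cs (i+1) from by
              rw [pvDepthAt_succ cs i hlt, hb2]; rfl]
        exact pvAloop_eq cs (i+1) start out (by omega)
      · by_cases hacc : pvDepthAt cs i = 0 ∧ PySem.Chars.lower ((cs.drop i).take 5) = pvPat
        · rw [if_neg hb1, if_neg hb2, if_pos hacc,
              if_pos (And.intro hacc.2 hacc.1), pvOutApp,
              show pvDepthAt cs i = pvDepthAt cs (i+5) from (pvMatch_depth cs i hacc.2).symm,
              show ([] : List Char) = (cs.drop (i+5)).take ((i+5) - (i+5)) from by simp]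
          rw [pvAloop_eq cs (i+5) (i+5) (out ++ pvStripNE ((cs.drop start).take (i - start))) le_rfl]
          simp [pvEmitFrom]
        · rw [if_neg hb1, if_neg hb2, if_neg hacc, if_neg (fun hc => hacc ⟨hc.2, hc.1⟩), hcur,
              show pvDepthAt cs i = pvDepthAt cs (i+1) from by
                rw [pvDepthAt_succ cs i hlt]
                unfold pvStepD
                rw [if_neg hb1, if_neg hb2]]
          exact pvAloop_eq cs (i+1) start out (by omega)
  · rw [pvAloop, dif_neg hlt, pvScan, dif_neg hlt]
    have hall : (cs.drop start).take (i - start) = cs.drop start := by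
      apply List.take_of_length_le
      simp
      omega
    rw [hall]
    simpa [pvEmitFrom] using pvOutApp (cs.drop start) out
termination_by cs.length - i
decreasing_by all_goals omega

theorem pvEmitFold (cs : List Char) (cuts : List Nat) (out : List String) (start : Nat) :
    (let st := cuts.foldl (fun (st : List String × Nat) (c : Nat) =>
        let tok := PySem.Chars.strip (PySem.List.slice cs (some (st.2 : Int)) (some (c : Int)))
        ((if tok = [] then st.1 else st.1 ++ [String.ofList tok]), (c + 5 : Nat))) (out, start)
     let tok := PySem.Chars.strip (PySem.List.slice cs (some (st.2 : Int)) none)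
     if tok = [] then st.1 else st.1 ++ [String.ofList tok])
      = out ++ pvEmitFrom cs start cuts := by
  induction cuts generalizing out start with
  | nil =>
    dsimp only [List.foldl_nil]
    rw [PySem.List.slice_from_natCast, pvOutApp]
    rfl
  | cons c rest ih =>
    dsimp only [List.foldl_cons]
    rw [ih, PySem.List.slice_natCast, pvOutApp]
    simp [pvEmitFrom]

-- ===== VERDICT (by name: the statement is the Claim_ definition above) =====
theorem split_authors_raw_spec : Claim_equal_split_authors_raw := by
  intro s _
  unfold Spec_split_authors_raw split_authors_raw split_authors_raw_alt
  by_cases hnil : s.toList = []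
  · simp [hnil]
  · simp only [if_neg hnil]
    have h1 := pvAloop_eq s.toList 0 0 [] (le_refl 0)
    have h2 := pvCutsLoop_eq_scan s.toList (s.toList.length + 1) 0 (Nat.zero_le _) (by omega)
    have h3 := pvEmitFold s.toList (pvScan s.toList 0) [] 0
    simp only [pvDepthAt, List.take_zero, List.foldl_nil, List.drop_zero, Nat.sub_zero] at h1
    rw [h1, h2, h3]
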